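-- pv_equiv track=rewrite | github.com/wastrilith2k/Tmux-Orchestrator | utils/spec_kit_integration.py | _generate_test_tasks
-- ===== SOURCE A (Python) =====
-- from typing import Dict, List, Optional, Tuple
--
-- def _generate_test_tasks(supporting_docs: Dict) -> str:
--     """Generate test-related tasks"""
--     tasks = []
--     task_num = 4
--
--     if 'contracts' in supporting_docs:
--         for contract in supporting_docs['contracts']:
--             tasks.append(f"- [ ] T{task_num:03d} [P] Create contract tests for {contract}")
--             task_num += 1
--
--     tasks.extend([
--         f"- [ ] T{task_num:03d} [P] Create unit tests for core functionality",
--         f"- [ ] T{task_num+1:03d} [P] Create integration tests for main workflows",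
--         f"- [ ] T{task_num+2:03d} [P] Create end-to-end tests for user scenarios"
--     ])
--
--     return "\n".join(tasks)
-- ===== SOURCE B (Python) =====
-- def _generate_test_tasks(supporting_docs):
--     """Generate test-related tasks"""
--     def rec(contracts, n):
--         if not contracts:
--             return (f"- [ ] T{n:03d} [P] Create unit tests for core functionality\n"
--                     f"- [ ] T{n+1:03d} [P] Create integration tests for main workflows\n"
--                     f"- [ ] T{n+2:03d} [P] Create end-to-end tests for user scenarios")
--         return (f"- [ ] T{n:03d} [P] Create contract tests for {contracts[0]}\n"
--                 + rec(contracts[1:], n + 1))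
--     return rec(supporting_docs.get('contracts', []), 4)
-- ===== Notes on version B (the rewrite author's own statement) =====
-- stated objective: alternative
-- what changed: B replaces A's accumulate-into-a-list-then-join loop with a direct recursion over the contracts list that builds the final string back-to-front, embedding the separators as it goes; no task list, no counter variable, no join.
import Mathlib
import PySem

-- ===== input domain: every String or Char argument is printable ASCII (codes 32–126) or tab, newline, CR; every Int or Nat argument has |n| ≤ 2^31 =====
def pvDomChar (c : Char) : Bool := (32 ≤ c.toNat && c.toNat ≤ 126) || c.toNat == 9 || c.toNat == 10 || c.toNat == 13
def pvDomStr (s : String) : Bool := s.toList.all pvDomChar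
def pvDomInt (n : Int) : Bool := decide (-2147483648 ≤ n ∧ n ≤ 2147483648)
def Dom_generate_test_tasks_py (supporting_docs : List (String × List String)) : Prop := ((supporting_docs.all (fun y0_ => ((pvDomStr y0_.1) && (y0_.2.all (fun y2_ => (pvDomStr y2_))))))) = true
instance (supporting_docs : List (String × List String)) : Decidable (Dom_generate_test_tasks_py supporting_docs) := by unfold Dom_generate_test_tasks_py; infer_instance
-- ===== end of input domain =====

-- B replaces A's list-accumulating loop + join with a direct recursion over the contracts
-- that builds the result string back-to-front; objective: alternative decomposition.

-- f"{n:03d}" for the nonnegative n occurring here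
def pvFmt3 (n : Int) : String := PySem.Str.zfill (PySem.Int.toStr n) 3

-- ===== PORT A =====
def generate_test_tasks_py (supporting_docs : List (String × List String)) : String :=
  let st : List String × Int := ([], 4)
  let st :=
    match PySem.Dict.get? (PySem.Dict.mk supporting_docs) "contracts" with
    | some contracts =>
        contracts.foldl (fun (st : List String × Int) contract =>
          (st.1 ++ ["- [ ] T" ++ pvFmt3 st.2 ++ " [P] Create contract tests for " ++ contract],
           st.2 + 1)) st
    | none => st
  let tasks := st.1 ++
    ["- [ ] T" ++ pvFmt3 st.2 ++ " [P] Create unit tests for core functionality",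
     "- [ ] T" ++ pvFmt3 (st.2 + 1) ++ " [P] Create integration tests for main workflows",
     "- [ ] T" ++ pvFmt3 (st.2 + 2) ++ " [P] Create end-to-end tests for user scenarios"]
  PySem.Str.join "\n" tasks

-- ===== PORT B =====
-- Source B's inner recursion rec(contracts, n)
def pvAltRec : List String → Int → String
  | [], n =>
      "- [ ] T" ++ pvFmt3 n ++ " [P] Create unit tests for core functionality\n" ++
      "- [ ] T" ++ pvFmt3 (n + 1) ++ " [P] Create integration tests for main workflows\n" ++
      "- [ ] T" ++ pvFmt3 (n + 2) ++ " [P] Create end-to-end tests for user scenarios"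
  | c :: cs, n =>
      "- [ ] T" ++ pvFmt3 n ++ " [P] Create contract tests for " ++ c ++ "\n" ++
      pvAltRec cs (n + 1)

def generate_test_tasks_py_alt (supporting_docs : List (String × List String)) : String :=
  pvAltRec ((PySem.Dict.get? (PySem.Dict.mk supporting_docs) "contracts").getD []) 4

-- ===== PRECONDITION & SPEC =====
def Spec_generate_test_tasks_py (supporting_docs : List (String × List String)) (out : String) : Prop := out = generate_test_tasks_py_alt supporting_docs
instance (supporting_docs : List (String × List String)) (out : String) : Decidable (Spec_generate_test_tasks_py supporting_docs out) := by unfold Spec_generate_test_tasks_py; infer_instance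

-- ===== CLAIM (what is proved, stated in full; the proofs are below) =====
def Claim_equal_generate_test_tasks_py : Prop := ∀ (supporting_docs : List (String × List String)), Dom_generate_test_tasks_py supporting_docs → Spec_generate_test_tasks_py supporting_docs (generate_test_tasks_py supporting_docs)

-- ===== LEMMAS AND PROOFS =====

-- A's loop body, named for the lemmas below
def pvStepA (st : List String × Int) (contract : String) : List String × Int :=
  (st.1 ++ ["- [ ] T" ++ pvFmt3 st.2 ++ " [P] Create contract tests for " ++ contract],
   st.2 + 1)

lemma str_join_cons (sep a b : String) (rest : List String) :
    PySem.Str.join sep (a :: b :: rest) = a ++ sep ++ PySem.Str.join sep (b :: rest) := by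
  apply String.toList_injective
  simp [PySem.Str.toList_join, PySem.Chars.join_cons_cons]

lemma str_join_single (sep a : String) : PySem.Str.join sep [a] = a := by
  apply String.toList_injective
  simp [PySem.Str.toList_join, PySem.Chars.join, List.intercalate]

-- the accumulator of A's foldl only ever grows on the left
lemma foldlA_shift (cs : List String) (acc : List String) (n : Int) :
    cs.foldl pvStepA (acc, n)
      = (acc ++ (cs.foldl pvStepA ([], n)).1, (cs.foldl pvStepA ([], n)).2) := by
  induction cs generalizing acc n with
  | nil => simp
  | cons c cs ih =>
      simp only [List.foldl_cons, pvStepA, List.nil_append]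
      rw [ih, ih ["- [ ] T" ++ pvFmt3 n ++ " [P] Create contract tests for " ++ c]]
      simp

-- merging "\n" into the following string literal (all rfl on literals)
lemma merge_unit (s : String) :
    s ++ " [P] Create unit tests for core functionality" ++ "\n"
      = s ++ " [P] Create unit tests for core functionality\n" := by
  have h : (" [P] Create unit tests for core functionality" ++ "\n" : String)
      = " [P] Create unit tests for core functionality\n" := rfl
  rw [String.append_assoc, h]

lemma merge_integration (s : String) :
    s ++ " [P] Create integration tests for main workflows" ++ "\n"
      = s ++ " [P] Create integration tests for main workflows\n" := by
  have h : (" [P] Create integration tests for main workflows" ++ "\n" : String)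
      = " [P] Create integration tests for main workflows\n" := rfl
  rw [String.append_assoc, h]

-- joining A's accumulated tasks equals B's recursion
lemma joinA_eq_altRec (cs : List String) (n : Int) :
    PySem.Str.join "\n" ((cs.foldl pvStepA ([], n)).1 ++
      ["- [ ] T" ++ pvFmt3 (cs.foldl pvStepA ([], n)).2 ++ " [P] Create unit tests for core functionality",
       "- [ ] T" ++ pvFmt3 ((cs.foldl pvStepA ([], n)).2 + 1) ++ " [P] Create integration tests for main workflows",
       "- [ ] T" ++ pvFmt3 ((cs.foldl pvStepA ([], n)).2 + 2) ++ " [P] Create end-to-end tests for user scenarios"])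
      = pvAltRec cs n := by
  induction cs generalizing n with
  | nil =>
      simp only [List.foldl_nil, List.nil_append, pvAltRec]
      rw [str_join_cons, str_join_cons, str_join_single, merge_unit, merge_integration]
      simp only [String.append_assoc]
  | cons c cs ih =>
      simp only [List.foldl_cons]
      rw [foldlA_shift]
      have hstep : pvStepA ([], n) c
          = (["- [ ] T" ++ pvFmt3 n ++ " [P] Create contract tests for " ++ c], n + 1) := rfl
      rw [hstep]
      simp only [List.cons_append, List.nil_append]
      obtain ⟨b, rest, hbr⟩ := List.exists_cons_of_ne_nil
        (List.append_ne_nil_of_right_ne_nil (cs.foldl pvStepA ([], n + 1)).1 (by simp :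
          ["- [ ] T" ++ pvFmt3 (cs.foldl pvStepA ([], n + 1)).2 ++ " [P] Create unit tests for core functionality",
           "- [ ] T" ++ pvFmt3 ((cs.foldl pvStepA ([], n + 1)).2 + 1) ++ " [P] Create integration tests for main workflows",
           "- [ ] T" ++ pvFmt3 ((cs.foldl pvStepA ([], n + 1)).2 + 2) ++ " [P] Create end-to-end tests for user scenarios"] ≠ []))
      rw [hbr, str_join_cons, ← hbr, ih]
      show _ = "- [ ] T" ++ pvFmt3 n ++ " [P] Create contract tests for " ++ c ++ "\n" ++ pvAltRec cs (n + 1)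
      simp [String.append_assoc]

-- ===== VERDICT (by name: the statement is the Claim_ definition above) =====
theorem generate_test_tasks_py_spec : Claim_equal_generate_test_tasks_py := by
  intro docs _
  unfold Spec_generate_test_tasks_py generate_test_tasks_py generate_test_tasks_py_alt
  cases h : PySem.Dict.get? (PySem.Dict.mk docs) "contracts" with
  | none =>
      show PySem.Str.join "\n" _ = _
      simpa using joinA_eq_altRec [] 4
  | some cs =>
      show PySem.Str.join "\n" _ = _
      simpa [pvStepA] using joinA_eq_altRec cs 4
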